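-- pv_equiv track=rewrite | github.com/need-singularity/sylvian-singularity | math/cy3_symplectic_n6.py | partitions_in_box
-- ===== SOURCE A (Python) =====
-- def partitions_in_box(k, a, b):
--     """Count partitions of size k fitting in a x b box."""
--     count = 0
--     for l1 in range(min(a, k) + 1):
--         l2 = k - l1
--         if 0 <= l2 <= l1 and l2 <= b:
--             count += 1
--     # More precise: partitions (l1>=l2>=0) with l1<=b, l2<=b, l1+l2=k
--     # For 2-row partitions:
--     count = 0
--     for l1 in range(b + 1):
--         for l2 in range(l1 + 1):
--             if l1 + l2 == k:
--                 count += 1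
--     return count
-- ===== SOURCE B (Python) =====
-- def partitions_in_box(k, a, b):
--     """Count partitions of size k fitting in a x b box (closed form).
--
--     A valid 2-row partition is l1 >= l2 >= 0 with l1 <= b and l1 + l2 = k,
--     i.e. an integer l1 with ceil(k/2) <= l1 <= min(k, b).
--     """
--     lo = -(-k // 2)          # ceil(k/2)
--     hi = min(k, b)
--     return max(0, hi - lo + 1)
-- ===== Notes on version B (the rewrite author's own statement) =====
-- stated objective: faster
-- what changed: Replaced the O(b^2) double loop over (l1,l2) by the closed-form count of integers l1 in [ceil(k/2), min(k,b)].
import Mathlib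
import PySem

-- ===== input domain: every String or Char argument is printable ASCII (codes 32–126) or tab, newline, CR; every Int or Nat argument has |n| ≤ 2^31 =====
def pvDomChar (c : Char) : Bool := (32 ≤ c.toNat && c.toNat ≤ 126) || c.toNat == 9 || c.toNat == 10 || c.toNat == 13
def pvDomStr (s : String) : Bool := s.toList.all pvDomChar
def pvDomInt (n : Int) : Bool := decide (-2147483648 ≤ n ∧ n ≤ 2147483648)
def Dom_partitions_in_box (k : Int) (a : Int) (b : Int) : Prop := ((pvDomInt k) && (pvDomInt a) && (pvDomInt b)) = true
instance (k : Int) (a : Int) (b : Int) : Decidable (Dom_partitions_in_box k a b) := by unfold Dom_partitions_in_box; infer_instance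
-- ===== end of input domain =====

-- B replaces A's O(b^2) double loop by the closed-form count of l1 in [ceil(k/2), min(k,b)] (objective: faster).

-- ===== PORT A =====
-- Literal transliteration: the first loop's count is computed and then discarded (A overwrites it).
def partitions_in_box (k : Int) (a : Int) (b : Int) : Int :=
  let _count : Int := (PySem.List.pyRange 0 (min a k + 1) 1).foldl (fun c l1 =>
    let l2 := k - l1
    if 0 ≤ l2 ∧ l2 ≤ l1 ∧ l2 ≤ b then c + 1 else c) 0
  let count : Int := (PySem.List.pyRange 0 (b + 1) 1).foldl (fun c l1 =>
    (PySem.List.pyRange 0 (l1 + 1) 1).foldl (fun c' l2 =>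
      if l1 + l2 = k then c' + 1 else c') c) 0
  count

-- ===== PORT B =====
def partitions_in_box_alt (k : Int) (a : Int) (b : Int) : Int :=
  let lo := -(PySem.Int.floordiv (-k) 2)
  let hi := min k b
  max 0 (hi - lo + 1)

-- ===== PRECONDITION & SPEC =====
def Spec_partitions_in_box (k : Int) (a : Int) (b : Int) (out : Int) : Prop := out = partitions_in_box_alt k a b
instance (k : Int) (a : Int) (b : Int) (out : Int) : Decidable (Spec_partitions_in_box k a b out) := by unfold Spec_partitions_in_box; infer_instance

-- ===== CLAIM (what is proved, stated in full; the proofs are below) =====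
def Claim_equal_partitions_in_box : Prop := ∀ (k : Int) (a : Int) (b : Int), Dom_partitions_in_box k a b → Spec_partitions_in_box k a b (partitions_in_box k a b)

-- ===== LEMMAS AND PROOFS =====

-- Inner loop of A: counting l2 ∈ [0, m) with x + l2 = k.
lemma pib_inner (m : Nat) (k x c : Int) :
    (PySem.List.pyRange 0 (m : Int) 1).foldl (fun c' l2 =>
      if x + l2 = k then c' + 1 else c') c
    = c + (if 0 ≤ k - x ∧ k - x < (m : Int) then 1 else 0) := by
  induction m generalizing c with
  | zero =>
      rw [PySem.List.pyRange_one_eq_nil (by norm_num)]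
      simp only [List.foldl_nil]
      split_ifs with h
      · omega
      · omega
  | succ n ih =>
      rw [show ((n + 1 : Nat) : Int) = (n : Int) + 1 by push_cast; ring,
        PySem.List.pyRange_one_succ_right (by positivity), List.foldl_append, ih]
      simp only [List.foldl_cons, List.foldl_nil]
      split_ifs <;> omega

-- Outer loop of A: summing the inner counts for l1 ∈ [0, n).
lemma pib_outer (n : Nat) (k c : Int) :
    (PySem.List.pyRange 0 (n : Int) 1).foldl (fun cc l1 =>
      (PySem.List.pyRange 0 (l1 + 1) 1).foldl (fun c' l2 =>
        if l1 + l2 = k then c' + 1 else c') cc) c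
    = c + max 0 (min k ((n : Int) - 1) + ((-k) / 2) + 1) := by
  induction n generalizing c with
  | zero =>
      rw [PySem.List.pyRange_one_eq_nil (by norm_num)]
      simp only [List.foldl_nil]
      omega
  | succ n ih =>
      rw [show ((n + 1 : Nat) : Int) = (n : Int) + 1 by push_cast; ring,
        PySem.List.pyRange_one_succ_right (by positivity), List.foldl_append, ih]
      simp only [List.foldl_cons, List.foldl_nil]
      rw [show ((n : Int) + 1) = ((n + 1 : Nat) : Int) by push_cast; ring, pib_inner]
      push_cast
      split_ifs <;> omega

-- ===== VERDICT (by name: the statement is the Claim_ definition above) =====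
theorem partitions_in_box_spec : Claim_equal_partitions_in_box := by
  intro k a b _
  show partitions_in_box k a b = partitions_in_box_alt k a b
  unfold partitions_in_box partitions_in_box_alt
  dsimp only
  rw [PySem.Int.floordiv_eq_ediv_of_pos (by norm_num)]
  by_cases hb : 0 ≤ b
  · rw [show b + 1 = ((b.toNat + 1 : Nat) : Int) by omega, pib_outer]
    push_cast
    omega
  · rw [PySem.List.pyRange_one_eq_nil (by omega)]
    simp only [List.foldl_nil]
    omega
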